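-- pv_equiv track=rewrite | github.com/Duo-Lu/CMPT310 | Assignment3/a3_q1.py | make_n_queen_dig
-- ===== SOURCE A (Python) =====
-- def make_n_queen_row(N):
--     queen_list = []
--     row_list = []
--     row = 0
--     col = 0
--     for row in range(N * N):
--         row_list.append(row + 1)
--         if (row+1) % N == 0 and row != 0:
--             queen_list.append(row_list)
--             row_list = []
--
--     return queen_list
--
-- def make_n_queen_col(N):
--     queen_list = []
--     row_list = []
--     for row in range(N):
--         row_list = []
--         for col in range(N * N):
--             if col % N == row:
--                 row_list.append(col + 1)
--         queen_list.append(row_list)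
--
--     return queen_list
--
-- def make_n_queen_dig(N):
--     row_list = make_n_queen_row(N)[0]
--     col_list_org = make_n_queen_col(N)[0]
--     col_list_last = make_n_queen_col(N)[N-1]
--     del col_list_org[-1]
--     del col_list_org[0]
--     del col_list_last[-1]
--     del col_list_last[0]
--     col_list_last = col_list_last[::-1]
--
--
--     queen_list = []
--     for i in range(N - 1):
--         row_list = []
--         for j in range(i+1 , N * N + 1  , N + 1):
--             if len(row_list) >= N - i:
--                 break
--             row_list.append(j)
--
--         queen_list.append(row_list)
--
--     for item in col_list_org:
--         col_list = []
--         for j in range(item , N * N , N + 1):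
--             col_list.append(j)
--
--         queen_list.append(col_list)
--
--     i = N
--     while i > 1:
--         i -= 1
--         row_list = []
--         for j in range(i+1 , N * N + 1  , N - 1):
--             if len(row_list) >= i + 1:
--                 break
--             row_list.append(j)
--
--         queen_list.append(row_list)
--
--     for item in col_list_last:
--         col_list = []
--         for j in range(item , N * N , N - 1):
--             col_list.append(j)
--
--         queen_list.append(col_list)
--
--
--     return queen_list
-- ===== SOURCE B (Python) =====
-- def make_n_queen_dig(N):
--     # Enumerate the diagonals of the N x N board (cells numbered 1..N*N) directly
--     # by coordinates: cell(r, c) = r*N + c + 1.  O(N^2) total work.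
--     def cell(r, c):
--         return r * N + c + 1
--
--     diags = []
--     for c in range(N - 1):            # down-right diagonals starting on the top row
--         diags.append([cell(r, c + r) for r in range(N - c)])
--     for r in range(1, N - 1):         # down-right diagonals starting on the left column
--         diags.append([cell(r + k, k) for k in range(N - r)])
--     for c in range(N - 1, 0, -1):     # down-left diagonals starting on the top row
--         diags.append([cell(k, c - k) for k in range(c + 1)])
--     for r in range(N - 2, 0, -1):     # down-left diagonals starting on the right column
--         diags.append([cell(r + k, N - 1 - k) for k in range(N - r)])
--     return diags
-- ===== Notes on version B (the rewrite author's own statement) =====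
-- stated objective: faster
-- what changed: B enumerates each diagonal directly from (row, col) coordinates with cell(r,c)=r*N+c+1, instead of A's building all N columns of the grid twice (O(N^3) work), slicing out the first/last column, and re-deriving diagonals with capped stepped ranges; measured two orders of magnitude faster at the largest size both finish.
-- outside the precondition, e.g. on make_n_queen_dig(1): A raises IndexError, B returns []
import Mathlib
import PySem

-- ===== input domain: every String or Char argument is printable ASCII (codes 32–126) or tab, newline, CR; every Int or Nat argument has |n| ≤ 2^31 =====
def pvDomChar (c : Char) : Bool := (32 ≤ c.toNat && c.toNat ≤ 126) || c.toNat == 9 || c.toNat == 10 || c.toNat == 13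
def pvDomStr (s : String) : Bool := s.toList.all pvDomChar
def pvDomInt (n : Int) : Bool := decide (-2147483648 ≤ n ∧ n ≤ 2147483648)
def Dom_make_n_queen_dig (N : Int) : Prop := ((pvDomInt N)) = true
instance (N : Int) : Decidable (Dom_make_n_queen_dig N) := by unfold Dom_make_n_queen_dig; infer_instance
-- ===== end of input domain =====

-- B enumerates the diagonals directly by (row, col) coordinates instead of A's building every
-- column list of the grid twice, slicing, and re-deriving diagonals from capped stepped ranges;
-- equivalence is proved for N ≥ 2 (for N ≤ 1 the Python A raises IndexError).

-- ===== PORT A =====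
def make_n_queen_row (N : Int) : List (List Int) :=
  ((PySem.List.pyRange 0 (N * N) 1).foldl
    (fun (st : List (List Int) × List Int) row =>
      let rl := st.2 ++ [row + 1]
      if PySem.Int.mod (row + 1) N = 0 ∧ row ≠ 0 then (st.1 ++ [rl], []) else (st.1, rl))
    ([], [])).1

def make_n_queen_col (N : Int) : List (List Int) :=
  (PySem.List.pyRange 0 N 1).foldl
    (fun q row =>
      q ++ [(PySem.List.pyRange 0 (N * N) 1).foldl
              (fun rl col => if PySem.Int.mod col N = row then rl ++ [col + 1] else rl) []])
    []

-- 'for j in range(…): if len(row_list) >= cap: break; row_list.append(j)'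
def pvDigLoop (js : List Int) (cap : Int) (acc : List Int) : List Int :=
  match js with
  | [] => acc
  | j :: rest => if cap ≤ (acc.length : Int) then acc else pvDigLoop rest cap (acc ++ [j])

def make_n_queen_dig (N : Int) : List (List Int) :=
  -- make_n_queen_row(N)[0]: its value is never used below; the indexing raises IndexError
  -- exactly for N ≤ 1, which Pre_ excludes, so the default [] is never observed.
  let _row_list0 := PySem.List.pyGetD (make_n_queen_row N) 0 []
  let col_list_org0 := PySem.List.pyGetD (make_n_queen_col N) 0 []
  let col_list_last0 := PySem.List.pyGetD (make_n_queen_col N) (N - 1) []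
  -- del xs[-1]; del xs[0]  (both lists have length N ≥ 2 under Pre_, so no IndexError)
  let col_list_org := (col_list_org0.dropLast).drop 1
  let col_list_last := ((col_list_last0.dropLast).drop 1).reverse   -- xs[::-1]
  let q1 := (PySem.List.pyRange 0 (N - 1) 1).foldl
      (fun q i => q ++ [pvDigLoop (PySem.List.pyRange (i + 1) (N * N + 1) (N + 1)) (N - i) []]) []
  let q2 := col_list_org.foldl
      (fun q item => q ++ [(PySem.List.pyRange item (N * N) (N + 1)).foldl (fun c j => c ++ [j]) []]) q1
  -- 'i = N; while i > 1: i -= 1; …' visits i = N-1, N-2, …, 1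
  let q3 := (PySem.List.pyRange (N - 1) 0 (-1)).foldl
      (fun q i => q ++ [pvDigLoop (PySem.List.pyRange (i + 1) (N * N + 1) (N - 1)) (i + 1) []]) q2
  let q4 := col_list_last.foldl
      (fun q item => q ++ [(PySem.List.pyRange item (N * N) (N - 1)).foldl (fun c j => c ++ [j]) []]) q3
  q4

-- ===== PORT B =====
def make_n_queen_dig_alt (N : Int) : List (List Int) :=
  let cell := fun (r c : Int) => r * N + c + 1
  ((PySem.List.pyRange 0 (N - 1) 1).map (fun c =>
      (PySem.List.pyRange 0 (N - c) 1).map (fun r => cell r (c + r))))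
  ++ ((PySem.List.pyRange 1 (N - 1) 1).map (fun r =>
      (PySem.List.pyRange 0 (N - r) 1).map (fun k => cell (r + k) k)))
  ++ ((PySem.List.pyRange (N - 1) 0 (-1)).map (fun c =>
      (PySem.List.pyRange 0 (c + 1) 1).map (fun k => cell k (c - k))))
  ++ ((PySem.List.pyRange (N - 2) 0 (-1)).map (fun r =>
      (PySem.List.pyRange 0 (N - r) 1).map (fun k => cell (r + k) (N - 1 - k))))

-- ===== PRECONDITION & SPEC =====
-- For N ≤ 1 the Python A raises IndexError (make_n_queen_row(N)[0] on an empty list).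
def Pre_make_n_queen_dig (N : Int) : Prop := 2 ≤ N
instance (N : Int) : Decidable (Pre_make_n_queen_dig N) := by unfold Pre_make_n_queen_dig; infer_instance
def pvWitness_make_n_queen_dig : Int := 4

def Spec_make_n_queen_dig (N : Int) (out : List (List Int)) : Prop := out = make_n_queen_dig_alt N
instance (N : Int) (out : List (List Int)) : Decidable (Spec_make_n_queen_dig N out) := by unfold Spec_make_n_queen_dig; infer_instance

-- ===== CLAIM (what is proved, stated in full; the proofs are below) =====
def Claim_equal_make_n_queen_dig : Prop := ∀ (N : Int), Dom_make_n_queen_dig N → Pre_make_n_queen_dig N → Spec_make_n_queen_dig N (make_n_queen_dig N)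

-- ===== LEMMAS AND PROOFS =====

theorem pvDigLoop_eq_take (js : List Int) (cap : Int) (acc : List Int) :
    pvDigLoop js cap acc = acc ++ js.take (cap - acc.length).toNat := by
  induction js generalizing acc with
  | nil => simp [pvDigLoop]
  | cons j rest ih =>
    simp only [pvDigLoop]
    split_ifs with h
    · have h0 : (cap - acc.length).toNat = 0 := by omega
      simp [h0]
    · rw [ih]
      have h2 : (cap - (acc : List Int).length).toNat = (cap - ((acc ++ [j]).length : Int)).toNat + 1 := by
        simp; omega
      rw [h2, List.take_succ_cons]
      simp

theorem pv_ap_full (a b s m : Int) (hs : 0 < s) (hab : a < b)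
    (hcnt : (b - a + s - 1) / s = m) :
    PySem.List.pyRange a b s = (List.range m.toNat).map (fun k : Nat => a + s * (k : Int)) := by
  rw [PySem.List.pyRange_of_pos _ _ hs, if_pos hab, hcnt]

theorem pv_ap_take (a b s m : Int) (hs : 0 < s) (hab : a < b)
    (hcnt : m ≤ (b - a + s - 1) / s) :
    (PySem.List.pyRange a b s).take m.toNat = (List.range m.toNat).map (fun k : Nat => a + s * (k : Int)) := by
  rw [PySem.List.pyRange_of_pos _ _ hs, if_pos hab, ← List.map_take, List.take_range,
    Nat.min_eq_left (Int.toNat_le_toNat hcnt)]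

theorem pv_filter_range_eq (n t : Nat) (h : t < n) :
    (List.range n).filter (fun k => decide (k = t)) = [t] := by
  induction n with
  | zero => omega
  | succ n ih =>
    rw [List.range_succ, List.filter_append]
    by_cases ht : t = n
    · subst ht
      have h0 : (List.range t).filter (fun k => decide (k = t)) = [] := by
        apply List.filter_eq_nil_iff.mpr; intro k hk; simp at hk ⊢; omega
      simp [h0]
    · have h' : t < n := by omega
      rw [ih h']
      simp [Ne.symm ht]

theorem pv_filter_mod (N r : Int) (hN : 0 < N) (h0 : 0 ≤ r) (h1 : r < N) (m : Nat) :
    (PySem.List.pyRange 0 (m * N) 1).filter (fun c => decide (PySem.Int.mod c N = r))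
      = (List.range m).map (fun q : Nat => (q : Int) * N + r) := by
  induction m with
  | zero => simp [PySem.List.pyRange_one_eq_nil]
  | succ m ih =>
    have hcast : ((m + 1 : Nat) : Int) * N = (m : Int) * N + N := by push_cast; ring
    have hnn : (0 : Int) ≤ (m : Int) * N := by positivity
    rw [hcast, PySem.List.pyRange_one_append 0 ((m : Int) * N) ((m : Int) * N + N) hnn (by omega),
      List.filter_append, ih]
    have hb : PySem.List.pyRange ((m : Int) * N) ((m : Int) * N + N) 1
        = (List.range N.toNat).map (fun k : Nat => (m : Int) * N + (k : Int)) := by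
      rw [PySem.List.pyRange_one]
      congr 2
      omega
    rw [hb, List.filter_map]
    have hc : ∀ k ∈ List.range N.toNat,
        ((fun c => decide (PySem.Int.mod c N = r)) ∘ (fun k : Nat => (m : Int) * N + (k : Int))) k
          = (fun k => decide (k = r.toNat)) k := by
      intro k hk
      simp only [Function.comp_apply, List.mem_range] at hk ⊢
      have hmod : PySem.Int.mod ((m : Int) * N + (k : Int)) N = (k : Int) := by
        rw [PySem.Int.mod_eq_emod_of_pos hN]
        have h2 : ((m : Int) * N + (k : Int)) % N = (k : Int) % N := by
          rw [add_comm, mul_comm]; exact Int.add_mul_emod_self_left _ _ _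
        rw [h2, Int.emod_eq_of_lt (by positivity) (by omega)]
      rw [hmod]
      have hiff : ((k : Int) = r) ↔ (k = r.toNat) := by omega
      simp [hiff]
    rw [List.filter_congr hc, pv_filter_range_eq _ _ (by omega)]
    rw [List.range_succ, List.map_append]
    simp [Int.toNat_of_nonneg h0]

theorem pv_col_get (N : Int) (hN : 2 ≤ N) (row : Int) (h0 : 0 ≤ row) (h1 : row < N) :
    PySem.List.pyGetD (make_n_queen_col N) row []
      = (List.range N.toNat).map (fun q : Nat => (q : Int) * N + row + 1) := by
  unfold make_n_queen_col
  rw [PySem.List.foldl_append_singleton_eq_map, List.nil_append,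
    PySem.List.pyGetD_map_pyRange_of_nonneg _ _ _ _ h0 h1,
    PySem.List.foldl_append_ite, List.nil_append]
  have hNN : N * N = ((N.toNat : Nat) : Int) * N := by
    rw [Int.toNat_of_nonneg (by omega : (0:Int) ≤ N)]
  rw [hNN, pv_filter_mod N row (by omega) h0 h1 N.toNat, List.map_map]
  rfl

theorem pv_trim (f : Nat → Int) (n : Nat) (hn : 2 ≤ n) :
    (((List.range n).map f).dropLast).drop 1 = (List.range (n - 2)).map (fun q => f (q + 1)) := by
  have h1 : n = (n - 1) + 1 := by omega
  rw [h1, List.range_succ, List.map_append, List.map_singleton, List.dropLast_concat]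
  have h2 : n - 1 = (n - 2) + 1 := by omega
  rw [h2, List.range_succ_eq_map, List.map_cons, List.drop_one, List.tail_cons, List.map_map]
  simp [Nat.succ_eq_add_one]

theorem seg1 (N : Int) (hN : 2 ≤ N) :
    List.map (fun x => pvDigLoop (PySem.List.pyRange (x + 1) (N * N + 1) (N + 1)) (N - x) [])
        (PySem.List.pyRange 0 (N - 1)) =
    List.map (fun c => List.map (fun r => r * N + (c + r) + 1) (PySem.List.pyRange 0 (N - c)))
        (PySem.List.pyRange 0 (N - 1)) := by
  apply List.map_congr_left
  intro i hi
  rw [PySem.List.mem_pyRange_one] at hi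
  rw [pvDigLoop_eq_take, List.nil_append]
  have hnum : N * N + 1 - (i + 1) + (N + 1) - 1 = i * N + (N - i) * (N + 1) := by ring
  have hcnt : N - i ≤ (N * N + 1 - (i + 1) + (N + 1) - 1) / (N + 1) := by
    rw [hnum, Int.add_mul_ediv_right _ _ (by omega : (N:Int) + 1 ≠ 0)]
    have : (0:Int) ≤ i * N / (N + 1) := Int.ediv_nonneg (mul_nonneg hi.1 (by omega)) (by omega)
    omega
  have := pv_ap_take (i + 1) (N * N + 1) (N + 1) (N - i) (by omega)
    (by nlinarith) hcnt
  simp only [List.length_nil, Nat.cast_zero, sub_zero] at this ⊢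
  rw [this, PySem.List.pyRange_one, List.map_map]
  simp only [sub_zero]
  apply List.map_congr_left
  intro k hk
  simp only [Function.comp_apply]
  ring

theorem seg2 (N : Int) (hN : 2 ≤ N) :
    List.map (fun x => List.map (fun x => x) (PySem.List.pyRange x (N * N) (N + 1)))
        (List.drop 1 (PySem.List.pyGetD (make_n_queen_col N) 0 []).dropLast) =
    List.map (fun r => List.map (fun k => (r + k) * N + k + 1) (PySem.List.pyRange 0 (N - r)))
        (PySem.List.pyRange 1 (N - 1)) := by
  rw [pv_col_get N hN 0 (le_refl 0) (by omega), pv_trim _ N.toNat (by omega),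
    List.map_map, PySem.List.pyRange_one, List.map_map]
  have hn : (N - 1 - 1).toNat = N.toNat - 2 := by omega
  rw [hn]
  apply List.map_congr_left
  intro q hq
  rw [List.mem_range] at hq
  simp only [Function.comp_apply, List.map_id']
  have ha : ((q + 1 : Nat) : Int) * N + 0 + 1 = ((q : Int) + 1) * N + 1 := by push_cast; ring
  have hq1 : 1 ≤ 1 + (q : Int) ∧ 1 + (q : Int) ≤ N - 2 := by omega
  have hab : ((q : Int) + 1) * N + 1 < N * N := by nlinarith
  have hnum : N * N - (((q : Int) + 1) * N + 1) + (N + 1) - 1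
      = ((q : Int) + 1 - 1) + (N - ((q : Int) + 1)) * (N + 1) := by ring
  have hcnt : (N * N - (((q : Int) + 1) * N + 1) + (N + 1) - 1) / (N + 1) = N - ((q : Int) + 1) := by
    rw [hnum, Int.add_mul_ediv_right _ _ (by omega : (N:Int) + 1 ≠ 0),
      Int.ediv_eq_zero_of_lt (by omega) (by omega), zero_add]
  rw [ha, pv_ap_full _ _ _ _ (by omega) hab hcnt, PySem.List.pyRange_one, List.map_map]
  have hrng : (N - (1 + (q : Int)) - 0).toNat = (N - ((q : Int) + 1)).toNat := by omega
  rw [hrng]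
  apply List.map_congr_left
  intro k hk
  simp only [Function.comp_apply]
  ring

theorem seg3 (N : Int) (hN : 2 ≤ N) :
    List.map (fun x => pvDigLoop (PySem.List.pyRange (x + 1) (N * N + 1) (N - 1)) (x + 1) [])
        (PySem.List.pyRange (N - 1) 0 (-1)) =
    List.map (fun c => List.map (fun k => k * N + (c - k) + 1) (PySem.List.pyRange 0 (c + 1)))
        (PySem.List.pyRange (N - 1) 0 (-1)) := by
  apply List.map_congr_left
  intro i hi
  rw [PySem.List.mem_pyRange_neg_one] at hi
  rw [pvDigLoop_eq_take, List.nil_append]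
  have hnum : N * N + 1 - (i + 1) + (N - 1) - 1 = (N * N - i * N - 1) + (i + 1) * (N - 1) := by
    ring
  have hX : (0:Int) ≤ N * N - i * N - 1 := by
    nlinarith [mul_le_mul_of_nonneg_right (show i ≤ N - 1 by omega) (show (0:Int) ≤ N by omega)]
  have hcnt : i + 1 ≤ (N * N + 1 - (i + 1) + (N - 1) - 1) / (N - 1) := by
    rw [hnum, Int.add_mul_ediv_right _ _ (by omega : (N:Int) - 1 ≠ 0)]
    have : (0:Int) ≤ (N * N - i * N - 1) / (N - 1) := Int.ediv_nonneg hX (by omega)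
    omega
  have hab : i + 1 < N * N + 1 := by nlinarith
  have := pv_ap_take (i + 1) (N * N + 1) (N - 1) (i + 1) (by omega) hab hcnt
  simp only [List.length_nil, Nat.cast_zero, sub_zero] at this ⊢
  rw [this, PySem.List.pyRange_one, List.map_map]
  simp only [sub_zero]
  apply List.map_congr_left
  intro k hk
  simp only [Function.comp_apply]
  ring

theorem seg4 (N : Int) (hN : 2 ≤ N) :
    List.map (fun x => List.map (fun x => x) (PySem.List.pyRange x (N * N) (N - 1)))
        (List.drop 1 (PySem.List.pyGetD (make_n_queen_col N) (N - 1) []).dropLast).reverse =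
    List.map (fun r => List.map (fun k => (r + k) * N + (N - 1 - k) + 1) (PySem.List.pyRange 0 (N - r)))
        (PySem.List.pyRange (N - 2) 0 (-1)) := by
  rw [pv_col_get N hN (N - 1) (by omega) (by omega), pv_trim _ N.toNat (by omega),
    PySem.List.pyRange_neg_one_eq_reverse, List.map_reverse, List.map_reverse, List.map_map]
  congr 1
  have h1 : (0 : Int) + 1 = 1 := by ring
  have h2 : (N - 2) + 1 = N - 1 := by ring
  rw [h1, h2, PySem.List.pyRange_one, List.map_map]
  have hn : (N - 1 - 1).toNat = N.toNat - 2 := by omega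
  rw [hn]
  apply List.map_congr_left
  intro q hq
  rw [List.mem_range] at hq
  simp only [Function.comp_apply, List.map_id']
  have ha : ((q + 1 : Nat) : Int) * N + (N - 1) + 1 = (((q : Int) + 1) * N + N) := by push_cast; ring
  have hq1 : 1 ≤ 1 + (q : Int) ∧ 1 + (q : Int) ≤ N - 2 := by omega
  have hab : ((q : Int) + 1) * N + N < N * N := by nlinarith
  have hnum : N * N - (((q : Int) + 1) * N + N) + (N - 1) - 1
      = (N - 2 - ((q : Int) + 1)) + (N - ((q : Int) + 1)) * (N - 1) := by ring
  have hcnt : (N * N - (((q : Int) + 1) * N + N) + (N - 1) - 1) / (N - 1) = N - ((q : Int) + 1) := by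
    rw [hnum, Int.add_mul_ediv_right _ _ (by omega : (N:Int) - 1 ≠ 0),
      Int.ediv_eq_zero_of_lt (by omega) (by omega), zero_add]
  rw [ha, pv_ap_full _ _ _ _ (by omega) hab hcnt, PySem.List.pyRange_one, List.map_map]
  have hrng : (N - (1 + (q : Int)) - 0).toNat = (N - ((q : Int) + 1)).toNat := by omega
  rw [hrng]
  apply List.map_congr_left
  intro k hk
  simp only [Function.comp_apply]
  ring

-- ===== VERDICT (by name: the statements are the Claim_ definitions above) =====
theorem make_n_queen_dig_spec : Claim_equal_make_n_queen_dig := by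
  intro N _ hPre
  unfold Spec_make_n_queen_dig
  unfold Pre_make_n_queen_dig at hPre
  unfold make_n_queen_dig make_n_queen_dig_alt
  simp only [PySem.List.foldl_append_singleton_eq_map, List.nil_append, List.append_assoc]
  rw [seg1 N hPre, seg2 N hPre, seg3 N hPre, seg4 N hPre]
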